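-- pv_equiv track=rewrite | github.com/tushartg/Modern-Cryptology | level_3/Index_of_Coincidence.py | make_partition
-- ===== SOURCE A (Python) =====
-- def make_partition(st, period):
-- 	ar = []
-- 	for j in range(period):
-- 		i = j
-- 		temp = []
-- 		while(i < len(st)):
-- 			temp.append(st[i])
-- 			i += period
-- 		ar.append(temp)
-- 	return ar
-- ===== SOURCE B (Python) =====
-- def make_partition(st, period):
--     ar = [[] for _ in range(period)]
--     if period > 0:
--         for i, c in enumerate(st):
--             ar[i % period].append(c)
--     return ar
-- ===== Notes on version B (the rewrite author's own statement) =====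
-- stated objective: simpler
-- what changed: One enumerate pass distributes each character into its bucket ar[i % period], replacing A's period separate strided scans of the string.
import Mathlib
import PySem

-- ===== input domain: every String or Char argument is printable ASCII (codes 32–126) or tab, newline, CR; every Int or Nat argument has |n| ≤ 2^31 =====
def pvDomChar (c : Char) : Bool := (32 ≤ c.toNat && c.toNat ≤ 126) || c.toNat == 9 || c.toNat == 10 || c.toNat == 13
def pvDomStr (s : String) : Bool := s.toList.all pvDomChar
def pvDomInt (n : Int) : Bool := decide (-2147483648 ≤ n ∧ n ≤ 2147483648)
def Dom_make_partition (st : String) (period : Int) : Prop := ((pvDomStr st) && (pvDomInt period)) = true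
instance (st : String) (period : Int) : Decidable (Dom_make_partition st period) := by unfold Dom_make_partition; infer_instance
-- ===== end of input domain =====

-- B replaces A's `period` separate strided scans of the string by a single enumerate
-- pass that appends each character to bucket i % period (simpler decomposition).

-- ===== PORT A =====
-- the inner while loop: temp.append(st[i]); i += period.  The loop executes at most
-- len(st) iterations (i starts ≥ 0 and strictly increases), so fuel = st.toList.length
-- is enough; st[i] is always in range inside the loop, so the ' ' default of pyGet?
-- is never used.  Python's st[i] is the 1-character string, hence String.mk [c].
def make_partition_while (st : String) (period : Int) : Int → Nat → List String
  | _, 0 => []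
  | i, fuel + 1 =>
    if i < PySem.Str.len st then
      String.mk [(PySem.Str.pyGet? st i).getD ' '] ::
        make_partition_while st period (i + period) fuel
    else []

def make_partition (st : String) (period : Int) : List (List String) :=
  (PySem.List.pyRange 0 period 1).foldl
    (fun ar j => ar ++ [make_partition_while st period j st.toList.length]) []

-- ===== PORT B =====
def make_partition_alt (st : String) (period : Int) : List (List String) :=
  let ar : List (List String) := (PySem.List.pyRange 0 period 1).map (fun _ => [])
  if 0 < period then
    (PySem.List.enumerate st.toList 0).foldl
      (fun ar q =>
        PySem.List.pySetD ar (PySem.Int.mod q.1 period)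
          (PySem.List.pyGetD ar (PySem.Int.mod q.1 period) [] ++ [String.mk [q.2]]))
      ar
  else ar

-- ===== PRECONDITION & SPEC =====
def Spec_make_partition (st : String) (period : Int) (out : List (List String)) : Prop := out = make_partition_alt st period
instance (st : String) (period : Int) (out : List (List String)) : Decidable (Spec_make_partition st period out) := by unfold Spec_make_partition; infer_instance

-- ===== CLAIM (what is proved, stated in full; the proofs are below) =====
def Claim_equal_make_partition : Prop := ∀ (st : String) (period : Int), Dom_make_partition st period → Spec_make_partition st period (make_partition st period)

-- ===== LEMMAS AND PROOFS =====

-- the bucket of characters of cs whose index satisfies f, as 1-character strings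
def pvBucket (cs : List Char) (f : Int → Bool) : List String :=
  ((PySem.List.pyRange 0 (cs.length : Int) 1).filter f).map
    (fun k => String.mk [PySem.List.pyGetD cs k ' '])

lemma pv_foldl_append {α β : Type} (f : α → β) :
    ∀ (l : List α) (acc : List β),
      l.foldl (fun ar j => ar ++ [f j]) acc = acc ++ l.map f := by
  intro l
  induction l with
  | nil => simp
  | cons x xs ih => intro acc; simp [List.foldl_cons, ih]

-- arithmetic core: if k ≡ i (mod p), k > i is the same as k ≥ i + p
lemma pv_mod_step {p i k : Int} (hp : 0 < p) (hk : k % p = i % p) (hik : i < k) :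
    i + p ≤ k := by
  have h0 : (k - i) % p = 0 := Int.emod_eq_emod_iff_emod_sub_eq_zero.mp hk
  have hdvd : p ∣ k - i := Int.dvd_of_emod_eq_zero h0
  have := Int.le_of_dvd (by omega) hdvd
  omega

lemma pv_while_eq (st : String) (p : Int) (hp : 0 < p) :
    ∀ (fuel : Nat) (i : Int), 0 ≤ i →
      (st.toList.length : Int) ≤ i + p * fuel →
      make_partition_while st p i fuel =
        pvBucket st.toList (fun k => decide (i ≤ k ∧ k % p = i % p)) := by
  intro fuel
  induction fuel with
  | zero =>
    intro i hi hle
    simp only [Nat.cast_zero, mul_zero, add_zero] at hle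
    simp only [make_partition_while, pvBucket]
    rw [List.filter_eq_nil_iff.mpr, List.map_nil]
    intro k hk
    have := PySem.List.mem_pyRange_one.mp hk
    simp only [decide_eq_true_eq, not_and]
    omega
  | succ fuel ih =>
    intro i hi hle
    by_cases hin : i < (st.toList.length : Int)
    · have hbound : (st.toList.length : Int) ≤ (i + p) + p * fuel := by
        push_cast at hle ⊢; nlinarith [hle]
      rw [show make_partition_while st p i (fuel + 1) =
        String.mk [(PySem.Str.pyGet? st i).getD ' '] ::
          make_partition_while st p (i + p) fuel from by
            simp only [make_partition_while, PySem.Str.len_eq]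
            rw [if_pos hin]]
      rw [ih (i + p) (by omega) hbound]
      -- now compute the RHS bucket
      have hmod : (i + p) % p = i % p := by simpa using Int.add_mul_emod_self_left i p 1
      have hsplit : PySem.List.pyRange 0 (st.toList.length : Int) 1
          = PySem.List.pyRange 0 i 1 ++ i :: PySem.List.pyRange (i+1) (st.toList.length : Int) 1 := by
        rw [PySem.List.pyRange_one_append 0 i _ hi (by omega), PySem.List.pyRange_one_cons hin]
      simp only [pvBucket, hsplit, List.filter_append, List.filter_cons, List.map_append]
      have hpre1 : (PySem.List.pyRange 0 i 1).filter (fun k => decide (i ≤ k ∧ k % p = i % p)) = [] := by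
        rw [List.filter_eq_nil_iff]; intro k hk
        have := PySem.List.mem_pyRange_one.mp hk
        simp only [decide_eq_true_eq, not_and]; omega
      have hpre2 : (PySem.List.pyRange 0 i 1).filter (fun k => decide (i + p ≤ k ∧ k % p = (i + p) % p)) = [] := by
        rw [List.filter_eq_nil_iff]; intro k hk
        have := PySem.List.mem_pyRange_one.mp hk
        simp only [decide_eq_true_eq, not_and]; omega
      have hrest : (PySem.List.pyRange (i+1) (st.toList.length : Int) 1).filter
            (fun k => decide (i ≤ k ∧ k % p = i % p))
          = (PySem.List.pyRange (i+1) (st.toList.length : Int) 1).filter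
            (fun k => decide (i + p ≤ k ∧ k % p = (i + p) % p)) := by
        apply List.filter_congr
        intro k hk
        have hklo := (PySem.List.mem_pyRange_one.mp hk).1
        simp only [decide_eq_decide, hmod]
        constructor
        · rintro ⟨h1, h2⟩; exact ⟨pv_mod_step hp h2 (by omega), h2⟩
        · rintro ⟨h1, h2⟩; exact ⟨by omega, h2⟩
      rw [hpre1, hpre2, hrest]
      simp only [decide_eq_true_eq]
      rw [if_neg (by intro h; exact absurd h.1 (by omega)), if_pos (by simp)]
      simp only [List.map_nil, List.nil_append, List.map_cons]
      congr 2
    · rw [show make_partition_while st p i (fuel + 1) = [] from by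
        simp only [make_partition_while, PySem.Str.len_eq]; rw [if_neg hin]]
      simp only [pvBucket]
      rw [List.filter_eq_nil_iff.mpr, List.map_nil]
      intro k hk
      have := PySem.List.mem_pyRange_one.mp hk
      simp only [decide_eq_true_eq, not_and]
      omega

lemma pv_set_map_range {α : Type} (G : Int → α) (p m : Int) (v : α)
    (h0 : 0 ≤ m) (h1 : m < p) :
    ((PySem.List.pyRange 0 p 1).map G).set m.toNat v
      = (PySem.List.pyRange 0 p 1).map (fun j => if j = m then v else G j) := by
  apply List.ext_getElem
  · simp
  · intro k hk1 hk2
    simp only [List.getElem_set, List.getElem_map,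
      PySem.List.getElem_pyRange_one, zero_add]
    have hk : k < (p - 0).toNat := by
      simpa [PySem.List.length_pyRange_one] using hk2
    split_ifs with ha hb hb
    · rfl
    · exact absurd (by omega : (k : Int) = m) hb
    · exact absurd (by omega : m.toNat = k) ha
    · rfl

lemma pv_fold_inv (p : Int) (hp : 0 < p) :
    ∀ (rest : List Char) (start : Int), 0 ≤ start → ∀ (G : Int → List String),
      (PySem.List.enumerate rest start).foldl
        (fun ar q =>
          PySem.List.pySetD ar (PySem.Int.mod q.1 p)
            (PySem.List.pyGetD ar (PySem.Int.mod q.1 p) [] ++ [String.mk [q.2]]))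
        ((PySem.List.pyRange 0 p 1).map G)
      = (PySem.List.pyRange 0 p 1).map
          (fun j => G j ++
            ((PySem.List.enumerate rest start).filter (fun q => decide (q.1 % p = j))).map
              (fun q => String.mk [q.2])) := by
  intro rest
  induction rest with
  | nil => intro start _ G; simp [PySem.List.enumerate]
  | cons c rest ih =>
    intro start hs G
    have hm0 : PySem.Int.mod start p = start % p := by
      simp [PySem.Int.mod, Int.fmod_eq_emod, hp.le]
    have hmnn : 0 ≤ start % p := Int.emod_nonneg start (ne_of_gt hp)
    have hmlt : start % p < p := Int.emod_lt_of_pos start hp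
    rw [PySem.List.enumerate_cons, List.foldl_cons]
    rw [show (PySem.List.pySetD ((PySem.List.pyRange 0 p 1).map G) (PySem.Int.mod start p)
          (PySem.List.pyGetD ((PySem.List.pyRange 0 p 1).map G) (PySem.Int.mod start p) []
            ++ [String.mk [c]]))
        = (PySem.List.pyRange 0 p 1).map
            (fun j => if j = start % p then G (start % p) ++ [String.mk [c]] else G j) from by
      rw [hm0, PySem.List.pyGetD_map_pyRange_of_nonneg G p _ [] hmnn hmlt,
        PySem.List.pySetD_of_nonneg _ _ hmnn,
        pv_set_map_range G p _ _ hmnn hmlt]]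
    rw [ih (start + 1) (by omega) _]
    apply List.map_congr_left
    intro j hj
    have hjb := PySem.List.mem_pyRange_one.mp hj
    rw [List.filter_cons]
    by_cases hje : start % p = j
    · subst hje
      rw [if_pos (by simp), if_pos (by simp)]
      simp [List.append_assoc]
    · rw [if_neg (by simpa using (Ne.symm hje)), if_neg (by simpa using hje)]

lemma pv_bucket_bridge (cs : List Char) (p j : Int) :
    ((PySem.List.enumerate cs 0).filter (fun q => decide (q.1 % p = j))).map
        (fun q => String.mk [q.2])
      = pvBucket cs (fun k => decide (k % p = j)) := by
  rw [PySem.List.enumerate_eq_map_pyRange cs ' ']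
  simp [pvBucket, List.filter_map, List.map_map, Function.comp_def]

-- ===== VERDICT (by name: the statement is the Claim_ definition above) =====
theorem make_partition_spec : Claim_equal_make_partition := by
  intro st period _
  show make_partition st period = make_partition_alt st period
  by_cases hp : 0 < period
  · simp only [make_partition, make_partition_alt, if_pos hp]
    rw [pv_foldl_append, List.nil_append,
      pv_fold_inv period hp st.toList 0 (le_refl 0) (fun _ => [])]
    apply List.map_congr_left
    intro j hj
    have hjb := PySem.List.mem_pyRange_one.mp hj
    have hn1 : (1 : Int) * (st.toList.length : Int) ≤ period * (st.toList.length : Int) := by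
      exact mul_le_mul_of_nonneg_right (by omega) (by positivity)
    rw [pv_while_eq st period hp st.toList.length j hjb.1 (by linarith),
      List.nil_append, pv_bucket_bridge]
    unfold pvBucket
    congr 1
    apply List.filter_congr
    intro k hk
    have hkb := PySem.List.mem_pyRange_one.mp hk
    have hjj : j % period = j := Int.emod_eq_of_lt hjb.1 hjb.2
    simp only [decide_eq_decide, hjj]
    constructor
    · rintro ⟨h1, h2⟩; omega
    · intro h2
      refine ⟨?_, by omega⟩
      by_contra hlt
      have hkk : k % period = k := Int.emod_eq_of_lt hkb.1 (by omega)
      omega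
  · simp [make_partition, make_partition_alt,
      PySem.List.pyRange_one_eq_nil (by omega : period ≤ 0), hp]
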